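-- pv_equiv track=rewrite | github.com/101Jay/algorithm-source | BOJ/String/lost_parenthesis.py | make_num
-- ===== SOURCE A (Python) =====
-- def make_num(stack):
--     res = 0
--     pos = 1
--     while stack:
--         cur_num = int(stack.pop())
--         res += cur_num * pos
--         pos = pos * 10
--     return res
-- ===== SOURCE B (Python) =====
-- def make_num(stack):
--     # Horner's method, forward pass; clears the stack to preserve A's side effect
--     res = 0
--     for d in stack:
--         res = res * 10 + int(d)
--     stack.clear()
--     return res
-- ===== Notes on version B (the rewrite author's own statement) =====
-- stated objective: simpler
-- what changed: Replaces the back-to-front pop loop with two accumulators (result and running power of ten) by a single forward Horner pass maintaining one accumulator.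
import Mathlib
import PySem

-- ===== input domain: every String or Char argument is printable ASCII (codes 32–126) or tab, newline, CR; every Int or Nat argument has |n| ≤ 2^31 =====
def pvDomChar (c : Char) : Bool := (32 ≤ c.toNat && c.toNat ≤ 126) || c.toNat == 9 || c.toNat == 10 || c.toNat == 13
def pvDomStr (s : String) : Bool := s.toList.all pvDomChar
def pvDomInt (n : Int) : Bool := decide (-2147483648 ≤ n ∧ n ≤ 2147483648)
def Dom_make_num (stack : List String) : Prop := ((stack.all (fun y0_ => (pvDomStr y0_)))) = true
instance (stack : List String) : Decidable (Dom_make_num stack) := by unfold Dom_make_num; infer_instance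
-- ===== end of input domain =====

-- B builds the number by a forward Horner pass with one accumulator instead of A's
-- back-to-front pop loop with a separate running power of ten; both empty the stack
-- argument in place (equivalence proved is about the return value).

-- ===== PORT A =====
-- A pops from the end: processing order is stack.reverse; res and pos are the loop state.
def make_num_aux : List String → Int → Int → Int
  | [], res, _ => res
  | s :: rest, res, pos =>
      make_num_aux rest (res + (PySem.Int.ofStr? s).getD 0 * pos) (pos * 10)

def make_num (stack : List String) : Int := make_num_aux stack.reverse 0 1

-- ===== PORT B =====
def make_num_alt (stack : List String) : Int :=
  stack.foldl (fun res d => res * 10 + (PySem.Int.ofStr? d).getD 0) 0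

-- ===== PRECONDITION & SPEC =====
-- Pre_ excludes exactly the inputs on which A's int() raises ValueError: every element must be
-- an int literal in Python's grammar (optional whitespace, optional one sign '+'/'-', then
-- digits with single '_' separators strictly between digits) — exact on the ASCII domain.
def pyWhitespaceChar (c : Char) : Bool := c = ' ' || c = '\t' || c = '\n' || c = '\r'

def digitsRest : List Char → Bool
  | [] => true
  | '_' :: d :: t => d.isDigit && digitsRest t
  | ['_'] => false
  | c :: t => c.isDigit && digitsRest t

def intLikeChars (l : List Char) : Bool :=
  let m := ((l.dropWhile pyWhitespaceChar).reverse.dropWhile pyWhitespaceChar).reverse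
  let m2 : List Char := match m with
    | c :: t => if c = '+' || c = '-' then t else m
    | [] => []
  match m2 with
  | c :: t => c.isDigit && digitsRest t
  | [] => false

def Pre_make_num (stack : List String) : Prop :=
  ∀ s ∈ stack, intLikeChars s.toList = true
instance (stack : List String) : Decidable (Pre_make_num stack) := by
  unfold Pre_make_num; infer_instance
def pvWitness_make_num : List String := ["1_000", "+5", " 7 ", "007"]

def Spec_make_num (stack : List String) (out : Int) : Prop := out = make_num_alt stack
instance (stack : List String) (out : Int) : Decidable (Spec_make_num stack out) := by unfold Spec_make_num; infer_instance

-- ===== CLAIM (what is proved, stated in full; the proofs are below) =====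
def Claim_equal_make_num : Prop := ∀ (stack : List String), Dom_make_num stack → Pre_make_num stack → Spec_make_num stack (make_num stack)

-- ===== LEMMAS AND PROOFS =====

-- positional value: pv (a :: t) = int(a) * 10^|t| + pv t
def pvVal : List String → Int
  | [] => 0
  | a :: t => (PySem.Int.ofStr? a).getD 0 * 10 ^ t.length + pvVal t

theorem make_num_aux_append (xs : List String) (a : String) :
    ∀ res pos, make_num_aux (xs ++ [a]) res pos =
      make_num_aux xs res pos + pos * 10 ^ xs.length * (PySem.Int.ofStr? a).getD 0 := by
  induction xs with
  | nil => intro res pos; simp [make_num_aux]; ring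
  | cons x t ih =>
      intro res pos
      simp only [List.cons_append, make_num_aux, ih, List.length_cons]
      ring

theorem make_num_aux_reverse (l : List String) :
    ∀ res pos, make_num_aux l.reverse res pos = res + pos * pvVal l := by
  induction l with
  | nil => intro res pos; simp [make_num_aux, pvVal]
  | cons a t ih =>
      intro res pos
      rw [List.reverse_cons, make_num_aux_append, ih]
      simp only [pvVal, List.length_reverse]
      ring

theorem foldl_horner (l : List String) :
    ∀ r, l.foldl (fun res d => res * 10 + (PySem.Int.ofStr? d).getD 0) r
      = r * 10 ^ l.length + pvVal l := by
  induction l with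
  | nil => intro r; simp [pvVal]
  | cons a t ih =>
      intro r
      simp only [List.foldl_cons, ih, pvVal, List.length_cons]
      ring

-- ===== VERDICT (by name: the statement is the Claim_ definition above) =====
theorem make_num_spec : Claim_equal_make_num := by
  intro stack _ _
  unfold Spec_make_num make_num make_num_alt
  rw [make_num_aux_reverse, foldl_horner]
  ring
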